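-- pv_equiv track=rewrite | github.com/RynAgain/LED_MATRIX-Project | src/display/hail_mary_clock.py | _to_base6
-- ===== SOURCE A (Python) =====
-- def _to_base6(n):
--     """Convert a non-negative integer to a list of base-6 digits."""
--     if n == 0:
--         return [0]
--     digits = []
--     while n > 0:
--         digits.append(n % 6)
--         n //= 6
--     digits.reverse()
--     return digits
-- ===== SOURCE B (Python) =====
-- def _to_base6(n):
--     """Convert a non-negative integer to a list of base-6 digits,
--     extracted most-significant-first via the largest power of 6 <= n."""
--     if n == 0:
--         return [0]
--     if n < 0:
--         return []
--     p = 1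
--     while p * 6 <= n:
--         p *= 6
--     digits = []
--     while p >= 1:
--         digits.append(n // p)
--         n %= p
--         p //= 6
--     return digits
-- ===== Notes on version B (the rewrite author's own statement) =====
-- stated objective: alternative
-- what changed: Instead of collecting remainders least-significant-first and reversing, B first finds the largest power of 6 not exceeding n and then extracts digits most-significant-first by division/remainder against descending powers.
import Mathlib
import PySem

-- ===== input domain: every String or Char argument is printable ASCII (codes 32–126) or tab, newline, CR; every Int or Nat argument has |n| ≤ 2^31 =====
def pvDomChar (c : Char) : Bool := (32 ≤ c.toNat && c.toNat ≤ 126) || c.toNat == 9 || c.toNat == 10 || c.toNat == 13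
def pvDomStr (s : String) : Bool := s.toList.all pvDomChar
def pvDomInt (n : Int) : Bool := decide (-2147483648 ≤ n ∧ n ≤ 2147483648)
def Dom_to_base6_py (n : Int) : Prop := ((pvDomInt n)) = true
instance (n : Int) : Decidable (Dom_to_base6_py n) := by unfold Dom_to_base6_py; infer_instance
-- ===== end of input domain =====

-- B replaces A's collect-remainders-then-reverse loop with a most-significant-first extraction against descending powers of 6 (alternative decomposition, same cost).


-- ===== PORT A =====
-- A's while loop: append n % 6, then n //= 6
def toBase6Loop (n : Int) (digits : List Int) : List Int :=
  if 0 < n then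
    toBase6Loop (PySem.Int.floordiv n 6) (digits ++ [PySem.Int.mod n 6])
  else digits
termination_by n.toNat
decreasing_by
  rw [PySem.Int.floordiv_eq_ediv_of_pos (by omega)]
  omega

def to_base6_py (n : Int) : List Int :=
  if n = 0 then [0]
  else (toBase6Loop n []).reverse

-- ===== PORT B =====
-- B's first loop: grow p to the largest power of 6 with p ≤ n (the 0 < p argument is an invariant, not a computation)
def findPow6 (p n : Int) (hp : 0 < p) : Int :=
  if p * 6 ≤ n then findPow6 (p * 6) n (by omega) else p
termination_by (n - p).toNat
decreasing_by omega

-- B's second loop: digits.append(n // p); n %= p; p //= 6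
def extractLoop (p n : Int) (digits : List Int) : List Int :=
  if 1 ≤ p then
    extractLoop (PySem.Int.floordiv p 6) (PySem.Int.mod n p)
      (digits ++ [PySem.Int.floordiv n p])
  else digits
termination_by p.toNat
decreasing_by
  rw [PySem.Int.floordiv_eq_ediv_of_pos (by omega)]
  omega

def to_base6_py_alt (n : Int) : List Int :=
  if n = 0 then [0]
  else if n < 0 then []
  else extractLoop (findPow6 1 n (by omega)) n []

-- ===== PRECONDITION & SPEC =====
def Spec_to_base6_py (n : Int) (out : List Int) : Prop := out = to_base6_py_alt n
instance (n : Int) (out : List Int) : Decidable (Spec_to_base6_py n out) := by unfold Spec_to_base6_py; infer_instance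

-- ===== CLAIM (what is proved, stated in full; the proofs are below) =====
def Claim_equal_to_base6_py : Prop := ∀ (n : Int), Dom_to_base6_py n → Spec_to_base6_py n (to_base6_py n)

-- ===== LEMMAS AND PROOFS =====

-- least-significant-first digit list (what A's loop accumulates)
def lsb6 (n : Int) : List Int :=
  if 0 < n then n % 6 :: lsb6 (n / 6) else []
termination_by n.toNat
decreasing_by omega

-- most-significant-first digit list (what B's second loop accumulates)
def msb6 (p n : Int) : List Int :=
  if 1 ≤ p then n / p :: msb6 (p / 6) (n % p) else []
termination_by p.toNat
decreasing_by omega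

theorem msb6_pos {p : Int} (hp : 1 ≤ p) (n : Int) :
    msb6 p n = n / p :: msb6 (p / 6) (n % p) := by
  rw [msb6, if_pos hp]

theorem msb6_nonpos {p : Int} (hp : ¬ 1 ≤ p) (n : Int) : msb6 p n = [] := by
  rw [msb6, if_neg hp]

theorem msb6_one (n : Int) : msb6 1 n = [n] := by
  rw [msb6_pos le_rfl, msb6_nonpos (by norm_num)]
  norm_num

theorem toBase6Loop_eq (n : Int) (digits : List Int) :
    toBase6Loop n digits = digits ++ lsb6 n := by
  by_cases h : 0 < n
  · rw [toBase6Loop, if_pos h, lsb6, if_pos h,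
      PySem.Int.floordiv_eq_ediv_of_pos (by omega : (0:Int) < 6),
      PySem.Int.mod_eq_emod_of_pos (by omega : (0:Int) < 6),
      toBase6Loop_eq (n / 6)]
    simp
  · rw [toBase6Loop, if_neg h, lsb6, if_neg h]; simp
termination_by n.toNat
decreasing_by omega

theorem extractLoop_eq (p n : Int) (digits : List Int) :
    extractLoop p n digits = digits ++ msb6 p n := by
  by_cases h : 1 ≤ p
  · rw [extractLoop, if_pos h, msb6_pos h,
      PySem.Int.floordiv_eq_ediv_of_pos (by omega : (0:Int) < 6),
      PySem.Int.floordiv_eq_ediv_of_pos (by omega : 0 < p),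
      PySem.Int.mod_eq_emod_of_pos (by omega : 0 < p),
      extractLoop_eq (p / 6)]
    simp
  · rw [extractLoop, if_neg h, msb6_nonpos h]; simp
termination_by p.toNat
decreasing_by omega

theorem findPow6_spec (p n : Int) (hp : 0 < p) (hpn : p ≤ n) :
    ∃ j : ℕ, findPow6 p n hp = p * 6 ^ j ∧ p * 6 ^ j ≤ n ∧ n < p * 6 ^ (j + 1) := by
  by_cases h : p * 6 ≤ n
  · obtain ⟨j, hj1, hj2, hj3⟩ := findPow6_spec (p * 6) n (by omega) h
    refine ⟨j + 1, ?_, ?_, ?_⟩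
    · rw [findPow6, if_pos h, hj1]; ring
    · calc p * 6 ^ (j + 1) = p * 6 * 6 ^ j := by ring
        _ ≤ n := hj2
    · calc n < p * 6 * 6 ^ (j + 1) := hj3
        _ = p * 6 ^ (j + 1 + 1) := by ring
  · exact ⟨0, by rw [findPow6, if_neg h]; ring, by simpa using hpn, by simpa using lt_of_not_ge h⟩
termination_by (n - p).toNat
decreasing_by omega

-- (n % (6*q)) / 6 = (n / 6) % q
theorem emod_mul_ediv (q n : Int) : (n % (6 * q)) / 6 = (n / 6) % q := by
  rw [Int.emod_def n (6 * q), Int.emod_def (n / 6) q]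
  have h1 : n - 6 * q * (n / (6 * q)) = n + 6 * (-(q * (n / (6 * q)))) := by ring
  rw [h1, Int.add_mul_ediv_left _ _ (by norm_num : (6:Int) ≠ 0),
    Int.ediv_ediv_of_nonneg (by norm_num : (0:Int) ≤ 6)]
  ring

theorem one_le_pow6 (k : ℕ) : (1:Int) ≤ 6 ^ k := by
  have := pow_pos (by norm_num : (0:Int) < 6) k
  omega

theorem msb6_shift (k : ℕ) (n : Int) :
    msb6 ((6:Int) ^ (k + 1)) n = msb6 ((6:Int) ^ k) (n / 6) ++ [n % 6] := by
  induction k generalizing n with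
  | zero =>
    rw [pow_one, pow_zero, msb6_pos (by norm_num) n, msb6_one]
    have : (6:Int) / 6 = 1 := by norm_num
    rw [this, msb6_one]
    simp
  | succ k ih =>
    rw [msb6_pos (one_le_pow6 (k + 2)) n, msb6_pos (one_le_pow6 (k + 1)) (n / 6)]
    have e1 : n / 6 / (6:Int) ^ (k + 1) = n / (6:Int) ^ (k + 2) := by
      rw [Int.ediv_ediv_of_nonneg (by norm_num : (0:Int) ≤ 6)]
      congr 1; ring
    have e2 : ((6:Int) ^ (k + 2)) / 6 = (6:Int) ^ (k + 1) := by
      have : (6:Int) ^ (k + 2) = 6 * 6 ^ (k + 1) := by ring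
      rw [this, Int.mul_ediv_cancel_left _ (by norm_num : (6:Int) ≠ 0)]
    have e2' : ((6:Int) ^ (k + 1)) / 6 = (6:Int) ^ k := by
      have : (6:Int) ^ (k + 1) = 6 * 6 ^ k := by ring
      rw [this, Int.mul_ediv_cancel_left _ (by norm_num : (6:Int) ≠ 0)]
    have e3 : (n % (6:Int) ^ (k + 2)) / 6 = (n / 6) % (6:Int) ^ (k + 1) := by
      have : (6:Int) ^ (k + 2) = 6 * 6 ^ (k + 1) := by ring
      rw [this, emod_mul_ediv]
    have e4 : (n % (6:Int) ^ (k + 2)) % 6 = n % 6 := by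
      exact Int.emod_emod_of_dvd n ⟨6 ^ (k + 1), by ring⟩
    rw [e2, e2', ih (n % (6:Int) ^ (k + 2)), e3, e4, e1]
    simp

theorem msb6_eq_rev_lsb6 (k : ℕ) (n : Int) (h1 : (6:Int) ^ k ≤ n) (h2 : n < (6:Int) ^ (k + 1)) :
    msb6 ((6:Int) ^ k) n = (lsb6 n).reverse := by
  induction k generalizing n with
  | zero =>
    rw [pow_zero] at h1 ⊢
    norm_num at h2
    rw [msb6_one, lsb6, if_pos (by omega), lsb6, if_neg (by omega)]
    have hm : n % 6 = n := by omega
    rw [hm]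
    simp
  | succ k ih =>
    have h6 := one_le_pow6 (k + 1)
    have hn : 0 < n := by omega
    rw [msb6_shift, lsb6, if_pos hn]
    have b1 : (6:Int) ^ k ≤ n / 6 := by
      rw [Int.le_ediv_iff_mul_le (by norm_num : (0:Int) < 6)]
      calc (6:Int) ^ k * 6 = 6 ^ (k + 1) := by ring
        _ ≤ n := h1
    have b2 : n / 6 < (6:Int) ^ (k + 1) := by
      rw [Int.ediv_lt_iff_lt_mul (by norm_num : (0:Int) < 6)]
      calc n < (6:Int) ^ (k + 2) := h2
        _ = 6 ^ (k + 1) * 6 := by ring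
    rw [ih (n / 6) b1 b2]
    simp

-- ===== VERDICT (by name: the statement is the Claim_ definition above) =====
theorem to_base6_py_spec : Claim_equal_to_base6_py := by
  intro n _
  unfold Spec_to_base6_py to_base6_py to_base6_py_alt
  by_cases h0 : n = 0
  · simp [h0]
  · rw [if_neg h0, if_neg h0]
    by_cases hneg : n < 0
    · rw [if_pos hneg, toBase6Loop_eq, lsb6, if_neg (by omega)]
      simp
    · rw [if_neg hneg]
      have hn : 0 < n := by omega
      obtain ⟨j, hj1, hj2, hj3⟩ := findPow6_spec 1 n (by omega) (by omega)
      rw [extractLoop_eq, toBase6Loop_eq]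
      simp only [List.nil_append]
      rw [hj1]
      simp only [one_mul] at hj2 hj3 ⊢
      exact (msb6_eq_rev_lsb6 j n hj2 hj3).symm
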